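-- pv_equiv track=rewrite | github.com/CA-git-com-co/ACGS | services/core/acgs-pgp-v8/src/quantum/qec_engine.py | _calculate_pauli_eigenvalue
-- ===== SOURCE A (Python) =====
-- def _calculate_pauli_eigenvalue(state_index: int, pauli_string: str) -> int:
--     """Calculate eigenvalue of Pauli string for given computational basis state."""
--     eigenvalue = 1
--     n_qubits = len(pauli_string)
--
--     for i, pauli in enumerate(pauli_string):
--         qubit_index = n_qubits - 1 - i
--         bit_value = (state_index >> qubit_index) & 1
--
--         if pauli == "Z":
--             eigenvalue *= (-1) ** bit_value
--         elif pauli == "X":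
--             # X eigenvalue depends on superposition - simplified
--             eigenvalue *= (-1) ** (bit_value)
--         # 'I' (identity) doesn't change eigenvalue
--
--     return eigenvalue
-- ===== SOURCE B (Python) =====
-- def _calculate_pauli_eigenvalue(state_index: int, pauli_string: str) -> int:
--     """Calculate eigenvalue of Pauli string for given computational basis state."""
--     mask = 0
--     n_qubits = len(pauli_string)
--     for i, pauli in enumerate(pauli_string):
--         if pauli == "Z" or pauli == "X":
--             mask |= 1 << (n_qubits - 1 - i)
--     return -1 if (state_index & mask).bit_count() % 2 else 1
-- ===== Notes on version B (the rewrite author's own statement) =====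
-- stated objective: faster
-- what changed: Replaces the per-character product of (-1)**bit factors (a shift, mask and exponentiation per character) by a two-phase computation: one pass builds an integer bit mask of the X/Z positions, then a single C-level popcount parity of state_index & mask decides the sign.
import Mathlib
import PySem

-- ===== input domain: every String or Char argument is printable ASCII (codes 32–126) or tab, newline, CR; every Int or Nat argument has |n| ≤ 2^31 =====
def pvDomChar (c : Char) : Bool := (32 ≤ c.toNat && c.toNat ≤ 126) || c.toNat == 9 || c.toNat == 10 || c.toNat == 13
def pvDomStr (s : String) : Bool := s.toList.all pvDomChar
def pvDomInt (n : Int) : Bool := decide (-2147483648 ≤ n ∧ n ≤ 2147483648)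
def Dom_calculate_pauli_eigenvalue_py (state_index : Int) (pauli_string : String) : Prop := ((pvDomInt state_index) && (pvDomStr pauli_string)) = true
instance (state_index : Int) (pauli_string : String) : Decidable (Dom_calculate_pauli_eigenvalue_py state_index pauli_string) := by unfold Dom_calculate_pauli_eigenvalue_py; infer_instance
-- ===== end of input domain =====

-- B replaces A's per-character product of (-1)**bit factors by building a bit mask of the
-- X/Z positions and taking the popcount parity of state_index & mask (measured faster by the
-- timing run).

-- ===== PORT A =====
-- Python's 'state_index >> qubit_index' with qubit_index = n_qubits-1-i, always ≥ 0 here,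
-- is Lean's '>>>' on Int with a Nat shift amount; '(-1) ** bit_value' with bit_value ∈ {0,1}
-- is '(-1) ^ bit_value.toNat'.
def calculate_pauli_eigenvalue_py (state_index : Int) (pauli_string : String) : Int :=
  let n_qubits : Int := (pauli_string.toList.length : Int)
  (PySem.List.enumerate pauli_string.toList).foldl
    (fun eigenvalue ip =>
      let qubit_index : Int := n_qubits - 1 - ip.1
      let bit_value : Int := PySem.Int.band (state_index >>> qubit_index.toNat) 1
      if ip.2 = 'Z' then eigenvalue * (-1) ^ bit_value.toNat
      else if ip.2 = 'X' then eigenvalue * (-1) ^ bit_value.toNat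
      else eigenvalue)
    1

-- ===== PORT B =====
-- Python's '(state_index & mask).bit_count()' is PySem.Int.bitCount (exact: bit_count reads |n|,
-- and the argument is the Python '&' = PySem.Int.band); '1 << (n_qubits-1-i)' with a shift ≥ 0
-- is '(1 : Int) <<< (…).toNat'.
def calculate_pauli_eigenvalue_py_alt (state_index : Int) (pauli_string : String) : Int :=
  let n_qubits : Int := (pauli_string.toList.length : Int)
  let mask : Int := (PySem.List.enumerate pauli_string.toList).foldl
    (fun mask ip =>
      if ip.2 = 'Z' ∨ ip.2 = 'X' then
        PySem.Int.bor mask ((1 : Int) <<< ((n_qubits - 1 - ip.1).toNat))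
      else mask)
    0
  if PySem.Int.bitCount (PySem.Int.band state_index mask) % 2 = 1 then -1 else 1

-- ===== PRECONDITION & SPEC =====
def Spec_calculate_pauli_eigenvalue_py (state_index : Int) (pauli_string : String) (out : Int) : Prop := out = calculate_pauli_eigenvalue_py_alt state_index pauli_string
instance (state_index : Int) (pauli_string : String) (out : Int) : Decidable (Spec_calculate_pauli_eigenvalue_py state_index pauli_string out) := by unfold Spec_calculate_pauli_eigenvalue_py; infer_instance

-- ===== CLAIM (what is proved, stated in full; the proofs are below) =====
def Claim_equal_calculate_pauli_eigenvalue_py : Prop := ∀ (state_index : Int) (pauli_string : String), Dom_calculate_pauli_eigenvalue_py state_index pauli_string → Spec_calculate_pauli_eigenvalue_py state_index pauli_string (calculate_pauli_eigenvalue_py state_index pauli_string)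

-- ===== LEMMAS AND PROOFS =====

-- The two fold bodies, named so the loop lemmas can talk about them.
def pvBodyA (s n : Int) : Int → Int × Char → Int := fun eigenvalue ip =>
  let qubit_index : Int := n - 1 - ip.1
  let bit_value : Int := PySem.Int.band (s >>> qubit_index.toNat) 1
  if ip.2 = 'Z' then eigenvalue * (-1) ^ bit_value.toNat
  else if ip.2 = 'X' then eigenvalue * (-1) ^ bit_value.toNat
  else eigenvalue

def pvBodyB (n : Int) : Int → Int × Char → Int := fun mask ip =>
  if ip.2 = 'Z' ∨ ip.2 = 'X' then
    PySem.Int.bor mask ((1 : Int) <<< ((n - 1 - ip.1).toNat))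
  else mask

theorem portA_eq (s : Int) (str : String) :
    calculate_pauli_eigenvalue_py s str =
      (PySem.List.enumerate str.toList).foldl (pvBodyA s (str.toList.length : Int)) 1 := rfl

theorem portB_eq (s : Int) (str : String) :
    calculate_pauli_eigenvalue_py_alt s str =
      (if PySem.Int.bitCount (PySem.Int.band s
          ((PySem.List.enumerate str.toList).foldl (pvBodyB (str.toList.length : Int)) 0)) % 2 = 1
       then -1 else 1) := rfl

-- The mask of B as a plain natural number, defined structurally on the character list.
def pvMaskNat : List Char → Nat
  | [] => 0
  | c :: cs => if c = 'Z' ∨ c = 'X' then 2 ^ cs.length + pvMaskNat cs else pvMaskNat cs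

theorem pvMaskNat_append (l : List Char) (c : Char) :
    pvMaskNat (l ++ [c]) = 2 * pvMaskNat l + (if c = 'Z' ∨ c = 'X' then 1 else 0) := by
  induction l with
  | nil =>
      simp only [List.nil_append, pvMaskNat, List.length_nil, pow_zero]
      split_ifs <;> omega
  | cons x xs ih =>
      simp only [List.cons_append, pvMaskNat, ih, List.length_append, List.length_cons,
        List.length_nil, pow_succ]
      split_ifs <;> ring

-- Nat bit lemmas -------------------------------------------------------------

theorem pv_land_bit (a b : Nat) (x y : Bool) :
    (Nat.bit x a) &&& (Nat.bit y b) = Nat.bit (x && y) (a &&& b) :=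
  Nat.bitwise_bit (h := rfl) x a y b

theorem pv_bit_decomp (x : Nat) : Nat.bit (decide (x % 2 = 1)) (x / 2) = x := by
  rcases Nat.even_or_odd x with h | h
  · rw [Nat.even_iff] at h; simp [Nat.bit, h]; omega
  · rw [Nat.odd_iff] at h; simp [Nat.bit, h]; omega

theorem pv_land_step (x m b : Nat) (hb : b ≤ 1) :
    x &&& (2 * m + b) = 2 * ((x / 2) &&& m) + b * (x % 2) := by
  have h2 : 2 * m + b = Nat.bit (decide (b % 2 = 1)) m := by
    have hbb : b % 2 = b := Nat.mod_eq_of_lt (by omega)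
    rw [hbb]; interval_cases b <;> simp [Nat.bit]
  calc x &&& (2 * m + b)
      = (Nat.bit (decide (x % 2 = 1)) (x / 2)) &&& (Nat.bit (decide (b % 2 = 1)) m) := by
        rw [pv_bit_decomp, ← h2]
    _ = Nat.bit (decide (x % 2 = 1) && decide (b % 2 = 1)) ((x / 2) &&& m) := pv_land_bit _ _ _ _
    _ = 2 * ((x / 2) &&& m) + b * (x % 2) := by
        rcases Nat.mod_two_eq_zero_or_one x with h | h <;> interval_cases b <;>
          simp [Nat.bit, h]

theorem pv_two_mul_lor (a b : Nat) : (2 * a) ||| (2 * b) = 2 * (a ||| b) := by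
  simpa [Nat.bit] using
    Nat.bitwise_bit (f := or) (h := rfl) (a := false) (m := a) (b := false) (n := b)

theorem pv_two_mul_lor_one (a : Nat) : (2 * a) ||| 1 = 2 * a + 1 := by
  simpa [Nat.bit] using
    Nat.bitwise_bit (f := or) (h := rfl) (a := false) (m := a) (b := true) (n := 0)

-- Python '&' against a nonnegative mask, as a natural number -----------------

def pvBandNat (s : Int) (m : Nat) : Nat :=
  if 0 ≤ s then s.toNat &&& m else m - (m &&& (-s - 1).toNat)

theorem pv_band_eq_bandNat (s : Int) (m : Nat) :
    PySem.Int.band s (m : Int) = (pvBandNat s m : Int) := by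
  rw [PySem.Int.band.eq_1, pvBandNat]
  split_ifs with h1 h2 h2 <;> simp_all

theorem pv_bandNat_step (s : Int) (m b : Nat) (hb : b ≤ 1) :
    pvBandNat s (2 * m + b) = 2 * pvBandNat (s >>> (1 : Nat)) m + b * (PySem.Int.mod s 2).toNat := by
  cases s with
  | ofNat x =>
      have hsr : (Int.ofNat x) >>> (1 : Nat) = Int.ofNat (x / 2) := by
        show Int.ofNat (x >>> 1) = Int.ofNat (x / 2)
        simp [Nat.shiftRight_one]
      have hmod : (PySem.Int.mod (Int.ofNat x) 2).toNat = x % 2 := by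
        rw [PySem.Int.mod_eq_emod_of_pos (by norm_num), Int.ofNat_eq_natCast]
        omega
      rw [hsr, hmod]
      simp only [pvBandNat, Int.ofNat_eq_natCast, Int.natCast_nonneg, if_true, Int.toNat_natCast]
      rw [pv_land_step x m b hb]
  | negSucc t =>
      have hneg : ¬ (0 ≤ Int.negSucc t) := by
        rw [Int.negSucc_eq]; omega
      have hsr : (Int.negSucc t) >>> (1 : Nat) = Int.negSucc (t / 2) := by
        show Int.negSucc (t >>> 1) = Int.negSucc (t / 2)
        simp [Nat.shiftRight_one]
      have hneg2 : ¬ (0 ≤ Int.negSucc (t / 2)) := by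
        rw [Int.negSucc_eq]; omega
      have ht1 : (-(Int.negSucc t) - 1).toNat = t := by
        rw [Int.negSucc_eq]; omega
      have ht2 : (-(Int.negSucc (t / 2)) - 1).toNat = t / 2 := by
        rw [Int.negSucc_eq]; omega
      have hmod : (PySem.Int.mod (Int.negSucc t) 2).toNat = 1 - t % 2 := by
        rw [PySem.Int.mod_eq_emod_of_pos (by norm_num), Int.negSucc_eq]
        omega
      rw [hsr, hmod]
      simp only [pvBandNat, hneg, hneg2, if_false, ht1, ht2]
      have hland : (2 * m + b) &&& t = 2 * ((t / 2) &&& m) + b * (t % 2) := by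
        rw [Nat.land_comm]; exact pv_land_step t m b hb
      have hcomm : m &&& (t / 2) = (t / 2) &&& m := Nat.land_comm _ _
      rw [hland, hcomm]
      have hle1 : (t / 2) &&& m ≤ m := Nat.and_le_right
      have h2 : t % 2 ≤ 1 := by omega
      interval_cases b <;> rcases Nat.mod_two_eq_zero_or_one t with h | h <;>
        simp [h] <;> omega

theorem pv_bitCount_double (y r : Nat) (hr : r ≤ 1) :
    PySem.Int.bitCount ((2 * y + r : Nat) : Int) = r + PySem.Int.bitCount ((y : Nat) : Int) := by
  by_cases h : 2 * y + r = 0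
  · have hy : y = 0 := by omega
    have hrr : r = 0 := by omega
    simp [hy, hrr]
  · rw [PySem.Int.bitCount_natCast (by omega)]
    have e1 : (2 * y + r) % 2 = r := by omega
    have e2 : (2 * y + r) / 2 = y := by omega
    rw [e1, e2]

-- Shift-by-one lemmas for the two folds --------------------------------------

theorem pv_one_shiftLeft (j : Nat) : (1 : Int) <<< j = ((2 ^ j : Nat) : Int) := by
  simp [Int.shiftLeft_eq]

theorem pv_shiftRight_succ (s : Int) (a : Nat) : s >>> (a + 1) = (s >>> (1 : Nat)) >>> a := by
  rw [Nat.add_comm, Int.shiftRight_add]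

theorem pv_A_shift (s n : Int) (ps : List (Int × Char)) (h : ∀ p ∈ ps, 0 ≤ p.1 ∧ p.1 < n) :
    ∀ e : Int, ps.foldl (pvBodyA s (n + 1)) e = ps.foldl (pvBodyA (s >>> (1 : Nat)) n) e := by
  induction ps with
  | nil => intro e; rfl
  | cons p ps ih =>
      intro e
      have hp := h p (by simp)
      have hq : (n + 1 - 1 - p.1).toNat = (n - 1 - p.1).toNat + 1 := by omega
      have hbody : pvBodyA s (n + 1) e p = pvBodyA (s >>> (1 : Nat)) n e p := by
        simp only [pvBodyA, hq]
        rw [pv_shiftRight_succ]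
      simp only [List.foldl_cons, hbody]
      exact ih (fun q hq => h q (by simp [hq])) _

theorem pv_B_shift (n : Int) (ps : List (Int × Char)) (h : ∀ p ∈ ps, 0 ≤ p.1 ∧ p.1 < n) :
    ∀ m : Nat, ps.foldl (pvBodyB (n + 1)) ((2 * m : Nat) : Int) =
      2 * ps.foldl (pvBodyB n) ((m : Nat) : Int) := by
  induction ps with
  | nil => intro m; simp
  | cons p ps ih =>
      intro m
      have hp := h p (by simp)
      have hq : (n + 1 - 1 - p.1).toNat = (n - 1 - p.1).toNat + 1 := by omega
      have hrest : ∀ q ∈ ps, 0 ≤ q.1 ∧ q.1 < n := fun q hq => h q (by simp [hq])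
      by_cases hc : p.2 = 'Z' ∨ p.2 = 'X'
      · have e1 : pvBodyB (n + 1) ((2 * m : Nat) : Int) p =
            ((2 * (m ||| 2 ^ (n - 1 - p.1).toNat) : Nat) : Int) := by
          simp only [pvBodyB, if_pos hc, hq, pv_one_shiftLeft, pow_succ, PySem.Int.bor_natCast]
          congr 1
          rw [(by ring : 2 ^ (n - 1 - p.1).toNat * 2 = 2 * 2 ^ (n - 1 - p.1).toNat),
            pv_two_mul_lor]
        have e2 : pvBodyB n ((m : Nat) : Int) p = ((m ||| 2 ^ (n - 1 - p.1).toNat : Nat) : Int) := by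
          simp only [pvBodyB, if_pos hc, pv_one_shiftLeft, PySem.Int.bor_natCast]
        simp only [List.foldl_cons, e1, e2]
        exact ih hrest _
      · have e1 : pvBodyB (n + 1) ((2 * m : Nat) : Int) p = ((2 * m : Nat) : Int) := by
          simp only [pvBodyB, if_neg hc]
        have e2 : pvBodyB n ((m : Nat) : Int) p = ((m : Nat) : Int) := by
          simp only [pvBodyB, if_neg hc]
        simp only [List.foldl_cons, e1, e2]
        exact ih hrest m

theorem pv_enumerate_bounds (l : List Char) :
    ∀ p ∈ PySem.List.enumerate l 0, 0 ≤ p.1 ∧ p.1 < (l.length : Int) := by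
  intro p hp
  rw [PySem.List.mem_enumerate_iff] at hp
  obtain ⟨k, hk, rfl⟩ := hp
  refine ⟨by omega, ?_⟩
  simp
  omega

-- B's fold computes the mask pvMaskNat ---------------------------------------

theorem pv_Bfold_eq (l : List Char) :
    (PySem.List.enumerate l).foldl (pvBodyB (l.length : Int)) 0 = ((pvMaskNat l : Nat) : Int) := by
  induction l using List.reverseRecOn with
  | nil => simp [PySem.List.enumerate, pvMaskNat]
  | append_singleton l c ih =>
      have hen : PySem.List.enumerate (l ++ [c]) 0 =
          PySem.List.enumerate l 0 ++ [((l.length : Int), c)] := by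
        rw [PySem.List.enumerate_append]
        simp [PySem.List.enumerate_cons, PySem.List.enumerate_nil]
      have hlen : ((l ++ [c]).length : Int) = (l.length : Int) + 1 := by simp
      show (PySem.List.enumerate (l ++ [c]) 0).foldl (pvBodyB ((l ++ [c]).length : Int)) 0 =
        ((pvMaskNat (l ++ [c]) : Nat) : Int)
      rw [hen, hlen, List.foldl_append]
      have hfold : (PySem.List.enumerate l 0).foldl (pvBodyB ((l.length : Int) + 1)) 0 =
          2 * ((pvMaskNat l : Nat) : Int) := by
        have h := pv_B_shift (l.length : Int) _ (pv_enumerate_bounds l) 0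
        simpa [ih] using h
      rw [hfold]
      have hq0 : ((l.length : Int) + 1 - 1 - (l.length : Int)).toNat = 0 := by omega
      by_cases hc : c = 'Z' ∨ c = 'X'
      · simp only [List.foldl_cons, List.foldl_nil, pvBodyB, if_pos hc, hq0, pv_one_shiftLeft,
          pow_zero, pvMaskNat_append]
        rw [(by push_cast; ring : 2 * ((pvMaskNat l : Nat) : Int) = ((2 * pvMaskNat l : Nat) : Int)),
          PySem.Int.bor_natCast, pv_two_mul_lor_one]
      · simp only [List.foldl_cons, List.foldl_nil, pvBodyB, if_neg hc, pvMaskNat_append]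
        push_cast
        simp

-- The main induction: A's product equals the popcount parity of s & mask -----

theorem pv_main (l : List Char) : ∀ s : Int,
    (PySem.List.enumerate l).foldl (pvBodyA s (l.length : Int)) 1 =
      (if PySem.Int.bitCount (PySem.Int.band s ((pvMaskNat l : Nat) : Int)) % 2 = 1
       then -1 else 1) := by
  induction l using List.reverseRecOn with
  | nil =>
      intro s
      simp [PySem.List.enumerate, pvMaskNat, PySem.Int.band_zero, PySem.Int.bitCount_zero]
  | append_singleton l c ih =>
      intro s
      have hen : PySem.List.enumerate (l ++ [c]) 0 =
          PySem.List.enumerate l 0 ++ [((l.length : Int), c)] := by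
        rw [PySem.List.enumerate_append]
        simp [PySem.List.enumerate_cons, PySem.List.enumerate_nil]
      have hlen : ((l ++ [c]).length : Int) = (l.length : Int) + 1 := by simp
      show (PySem.List.enumerate (l ++ [c]) 0).foldl (pvBodyA s ((l ++ [c]).length : Int)) 1 = _
      rw [hen, hlen, List.foldl_append,
        pv_A_shift s (l.length : Int) _ (pv_enumerate_bounds l), ih (s >>> (1 : Nat))]
      have hq0 : ((l.length : Int) + 1 - 1 - (l.length : Int)).toNat = 0 := by omega
      have hsr0 : s >>> ((0 : Nat)) = s := by cases s <;> rfl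
      set k := PySem.Int.bitCount (PySem.Int.band (s >>> (1 : Nat)) ((pvMaskNat l : Nat) : Int))
        with hk
      -- the count of the extended mask splits off the low bit of s
      have hble : (if c = 'Z' ∨ c = 'X' then 1 else 0) ≤ 1 := by split_ifs <;> omega
      have hcount : PySem.Int.bitCount (PySem.Int.band s ((pvMaskNat (l ++ [c]) : Nat) : Int)) =
          (if c = 'Z' ∨ c = 'X' then 1 else 0) * (PySem.Int.mod s 2).toNat + k := by
        rw [pvMaskNat_append l c, pv_band_eq_bandNat, pv_bandNat_step s _ _ hble]
        have hr : (if c = 'Z' ∨ c = 'X' then 1 else 0) * (PySem.Int.mod s 2).toNat ≤ 1 := by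
          rcases PySem.Int.mod_two_eq s with h | h <;> rw [h] <;> split_ifs <;> simp
        rw [pv_bitCount_double _ _ hr, ← pv_band_eq_bandNat]
      rw [hcount]
      -- the final step of A's fold
      have hstep : ∀ E : Int,
          List.foldl (pvBodyA s ((l.length : Int) + 1)) E [((l.length : Int), c)] =
            (if c = 'Z' ∨ c = 'X' then E * (-1) ^ (PySem.Int.mod s 2).toNat else E) := by
        intro E
        simp only [List.foldl_cons, List.foldl_nil, pvBodyA, hq0, hsr0, PySem.Int.band_one]
        by_cases h1 : c = 'Z'
        · simp [h1]
        · by_cases h2 : c = 'X' <;> simp [h1, h2]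
      rw [hstep]
      -- finish by case analysis on the low bit, the parity so far, and whether c is X/Z
      rcases PySem.Int.mod_two_eq s with hm | hm <;> rw [hm] <;>
        by_cases hc : c = 'Z' ∨ c = 'X' <;>
        rcases Nat.mod_two_eq_zero_or_one k with hkp | hkp <;>
        simp [hc, hkp, Nat.add_mod]

-- ===== VERDICT (by name: the statement is the Claim_ definition above) =====
theorem calculate_pauli_eigenvalue_py_spec : Claim_equal_calculate_pauli_eigenvalue_py := by
  intro s str _
  unfold Spec_calculate_pauli_eigenvalue_py
  rw [portA_eq, portB_eq, pv_Bfold_eq, pv_main]
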